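-- pv_equiv track=rewrite | github.com/lafleur1/pMSAs | stockholm.py | make_lookup_alignment_dict
-- ===== SOURCE A (Python) =====
-- def make_lookup_alignment_dict(wt_seq, rf_line):
--     #For manually computing percent identity using the RF line in the stockholm file
--     #makes a lookup dictionary of the wildtype and alignment line positions to remove wild-type gaps
--     dict_lookup = {}
--     on_wt_index = 0
--     for i in range(0, len(rf_line)):
--         if rf_line[i] == 'x':
--             #is a wt position
--             dict_lookup[i] = wt_seq[on_wt_index]
--             on_wt_index += 1 #look for next wt position
--         else:
--             dict_lookup[i] = rf_line[i]
--     return dict_lookup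
-- ===== SOURCE B (Python) =====
-- def make_lookup_alignment_dict(wt_seq, rf_line):
--     # Prefix-count table instead of a threaded counter: counts[i] = number of
--     # 'x' characters in rf_line[:i+1]; then one dict comprehension.
--     counts = []
--     total = 0
--     for c in rf_line:
--         total += 1 if c == 'x' else 0
--         counts.append(total)
--     return {i: (wt_seq[counts[i] - 1] if c == 'x' else c)
--             for i, c in enumerate(rf_line)}
-- ===== Notes on version B (the rewrite author's own statement) =====
-- stated objective: alternative
-- what changed: Replaces the mutable on_wt_index counter threaded through the loop by a precomputed prefix-count table of 'x' characters, after which the result is a single dict comprehension over enumerate(rf_line) that indexes wt_seq directly with counts[i]-1.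
import Mathlib
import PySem

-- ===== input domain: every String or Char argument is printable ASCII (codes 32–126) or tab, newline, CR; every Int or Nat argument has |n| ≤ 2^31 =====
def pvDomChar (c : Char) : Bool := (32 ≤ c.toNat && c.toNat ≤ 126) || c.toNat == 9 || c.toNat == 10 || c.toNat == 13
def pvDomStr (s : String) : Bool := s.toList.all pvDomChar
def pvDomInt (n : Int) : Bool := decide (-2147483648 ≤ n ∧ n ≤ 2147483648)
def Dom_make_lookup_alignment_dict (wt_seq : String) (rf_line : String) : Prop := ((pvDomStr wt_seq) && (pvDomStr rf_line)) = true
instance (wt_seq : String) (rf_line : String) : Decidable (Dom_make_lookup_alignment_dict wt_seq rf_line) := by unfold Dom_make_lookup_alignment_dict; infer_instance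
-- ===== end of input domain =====

-- B replaces the threaded on_wt_index counter by a precomputed prefix-count table
-- of 'x' characters and builds the dict in one comprehension (objective: alternative).

-- ===== PORT A =====
-- A's for-loop over range(len(rf_line)) as structural recursion over rf_line's
-- characters, carrying the index i, the counter on_wt_index (k) and the dict;
-- none = the IndexError wt_seq[on_wt_index] raises when wt_seq is too short.
def pvGoA (ws : List Char) : List Char → Nat → Nat → PySem.Dict Int String →
    Option (PySem.Dict Int String)
  | [], _, _, d => some d
  | c :: rest, i, k, d =>
    if c = 'x' then
      match PySem.List.pyGet? ws (k : Int) with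
      | some w => pvGoA ws rest (i + 1) (k + 1) (d.insert (i : Int) (String.ofList [w]))
      | none => none
    else pvGoA ws rest (i + 1) k (d.insert (i : Int) (String.ofList [c]))

def make_lookup_alignment_dict (wt_seq : String) (rf_line : String) : List (Int × String) :=
  ((pvGoA wt_seq.toList rf_line.toList 0 0 PySem.Dict.empty).getD PySem.Dict.empty).items

-- ===== PORT B =====
-- counts[i] = number of 'x' in rf_line[:i+1], built by B's running-total loop.
def pvCounts : List Char → Int → List Int
  | [], _ => []
  | c :: rest, t =>
    let t' := t + (if c = 'x' then 1 else 0)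
    t' :: pvCounts rest t'

-- B's dict comprehension over enumerate(rf_line): keys are the distinct indices,
-- so the dict is the association list of the produced pairs, in order;
-- none = the IndexError of wt_seq[counts[i]-1] when wt_seq is too short.
def pvGoB (ws : List Char) (counts : List Int) : List (Int × Char) → Option (List (Int × String))
  | [] => some []
  | (i, c) :: rest =>
    (if c = 'x' then
        (PySem.List.pyGet? ws (PySem.List.pyGetD counts i 0 - 1)).map (fun w => String.ofList [w])
      else some (String.ofList [c])).bind
      (fun v => (pvGoB ws counts rest).map (fun tl => (i, v) :: tl))

def make_lookup_alignment_dict_alt (wt_seq : String) (rf_line : String) : List (Int × String) :=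
  (pvGoB wt_seq.toList (pvCounts rf_line.toList 0)
      (PySem.List.enumerate rf_line.toList 0)).getD []

-- ===== PRECONDITION & SPEC =====
-- Pre_ excludes exactly the inputs with more 'x' in rf_line than characters in
-- wt_seq; there A (and B) raises IndexError on wt_seq and returns nothing.
def Pre_make_lookup_alignment_dict (wt_seq : String) (rf_line : String) : Prop :=
  rf_line.toList.count 'x' ≤ wt_seq.toList.length
instance (wt_seq : String) (rf_line : String) : Decidable (Pre_make_lookup_alignment_dict wt_seq rf_line) := by
  unfold Pre_make_lookup_alignment_dict; infer_instance

def pvWitness_make_lookup_alignment_dict : String × String := ("AB", "x.x")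

def Spec_make_lookup_alignment_dict (wt_seq : String) (rf_line : String) (out : List (Int × String)) : Prop := out = make_lookup_alignment_dict_alt wt_seq rf_line
instance (wt_seq : String) (rf_line : String) (out : List (Int × String)) : Decidable (Spec_make_lookup_alignment_dict wt_seq rf_line out) := by unfold Spec_make_lookup_alignment_dict; infer_instance

-- ===== CLAIM (what is proved, stated in full; the proofs are below) =====
def Claim_equal_make_lookup_alignment_dict : Prop := ∀ (wt_seq : String) (rf_line : String), Dom_make_lookup_alignment_dict wt_seq rf_line → Pre_make_lookup_alignment_dict wt_seq rf_line → Spec_make_lookup_alignment_dict wt_seq rf_line (make_lookup_alignment_dict wt_seq rf_line)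

-- ===== LEMMAS AND PROOFS =====

-- the common value both loops produce, as a simple recursion
def pvSpecL (ws : List Char) : List Char → Nat → Nat → List (Int × String)
  | [], _, _ => []
  | c :: rest, i, k =>
    if c = 'x' then ((i : Int), String.ofList [ws.getD k '?']) :: pvSpecL ws rest (i + 1) (k + 1)
    else ((i : Int), String.ofList [c]) :: pvSpecL ws rest (i + 1) k

lemma pvGoA_eq (ws : List Char) : ∀ (cs : List Char) (i k : Nat) (d : PySem.Dict Int String),
    k + cs.count 'x' ≤ ws.length →
    (∀ p ∈ d.items, p.1 < (i : Int)) →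
    pvGoA ws cs i k d = some (PySem.Dict.mk (d.items ++ pvSpecL ws cs i k)) := by
  intro cs
  induction cs with
  | nil =>
    intro i k d _ _
    simp [pvGoA, pvSpecL]
  | cons c rest ih =>
    intro i k d hlen hkeys
    have hcontains : d.contains (i : Int) = false := by
      by_contra h
      have : d.contains (i : Int) = true := by
        cases hc : d.contains (i : Int) with
        | false => exact absurd hc h
        | true => rfl
      have hmem : (i : Int) ∈ d.keys := (PySem.Dict.contains_iff_mem_keys _ _).mp this
      have : ∃ p ∈ d.items, p.1 = (i : Int) := by
        simpa [PySem.Dict.keys] using hmem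
      obtain ⟨p, hp, hpi⟩ := this
      have := hkeys p hp
      omega
    have hkeys' : ∀ (v : String) (p : Int × String),
        p ∈ (d.insert (i : Int) v).items → p.1 < ((i + 1 : Nat) : Int) := by
      intro v p hp
      rw [PySem.Dict.mem_items_insert] at hp
      rcases hp with h | ⟨h, _⟩
      · subst h; push_cast; omega
      · have := hkeys p h; push_cast; omega
    have hitems : ∀ v : String, (d.insert (i : Int) v).items = d.items ++ [((i : Int), v)] :=
      fun v => PySem.Dict.items_insert_of_not_contains d v hcontains
    by_cases hx : c = 'x'
    · have hcnt : (c :: rest).count 'x' = rest.count 'x' + 1 := by simp [hx]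
      have hk : k < ws.length := by omega
      have hget : PySem.List.pyGet? ws (k : Int) = some ws[k] := by
        simp [PySem.List.pyGet?_natCast, List.getElem?_eq_getElem hk]
      rw [pvGoA, if_pos hx, hget]
      show pvGoA ws rest (i + 1) (k + 1) (d.insert (i : Int) (String.ofList [ws[k]])) = _
      rw [ih (i + 1) (k + 1) _ (by omega) (hkeys' _)]
      rw [hitems]
      simp [pvSpecL, hx, List.getD, List.getElem?_eq_getElem hk]
    · have hcnt : (c :: rest).count 'x' = rest.count 'x' := by simp [hx]
      rw [pvGoA, if_neg hx]
      rw [ih (i + 1) k _ (by omega) (hkeys' _)]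
      rw [hitems]
      simp [pvSpecL, hx]

lemma pvCounts_getD : ∀ (cs : List Char) (t : Int) (j : Nat), j < cs.length →
    (pvCounts cs t).getD j 0 = t + ((cs.take (j + 1)).count 'x' : Int) := by
  intro cs
  induction cs with
  | nil => intro t j h; simp at h
  | cons c rest ih =>
    intro t j h
    cases j with
    | zero =>
      simp [pvCounts, List.count_cons]
    | succ j =>
      have hih := ih (t + (if c = 'x' then 1 else 0)) j (by simpa using h)
      simp only [pvCounts, List.getD_cons_succ, hih, List.take_succ_cons, List.count_cons]
      split_ifs <;> simp_all <;> omega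

lemma pvGoB_eq (ws : List Char) (counts : List Int) :
    ∀ (cs : List Char) (s k : Nat),
    k + cs.count 'x' ≤ ws.length →
    (∀ j : Nat, j < cs.length →
        PySem.List.pyGetD counts ((s + j : Nat) : Int) 0 = (k : Int) + ((cs.take (j + 1)).count 'x' : Int)) →
    pvGoB ws counts (PySem.List.enumerate cs (s : Int)) = some (pvSpecL ws cs s k) := by
  intro cs
  induction cs with
  | nil => intro s k _ _; simp [PySem.List.enumerate_nil, pvGoB, pvSpecL]
  | cons c rest ih =>
    intro s k hlen hcounts
    rw [PySem.List.enumerate_cons, pvGoB]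
    have hrec : ∀ k' : Nat, k' + rest.count 'x' ≤ ws.length →
        ((k' : Int) = (k : Int) + (if c = 'x' then 1 else 0)) →
        pvGoB ws counts (PySem.List.enumerate rest ((s : Int) + 1)) = some (pvSpecL ws rest (s + 1) k') := by
      intro k' hlen' hk'
      have : ((s : Int) + 1) = ((s + 1 : Nat) : Int) := by push_cast; ring
      rw [this]
      apply ih (s + 1) k' hlen'
      intro j hj
      have h1 := hcounts (j + 1) (by simp; omega)
      have : ((s + 1) + j : Nat) = (s + (j + 1) : Nat) := by omega
      rw [this, h1]
      have : (c :: rest).take (j + 1 + 1) = c :: rest.take (j + 1) := by simp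
      rw [this, List.count_cons]
      split_ifs at hk' ⊢ <;> simp_all <;> omega
    by_cases hx : c = 'x'
    · have hcnt : (c :: rest).count 'x' = rest.count 'x' + 1 := by simp [hx]
      have hc0 := hcounts 0 (by simp)
      simp [hx] at hc0
      rw [if_pos hx]
      have hgetc : PySem.List.pyGetD counts (s : Int) 0 - 1 = (k : Int) := by
        simp only [PySem.List.pyGetD_natCast, List.getD]
        omega
      have hk : k < ws.length := by omega
      rw [hgetc]
      have hget : PySem.List.pyGet? ws (k : Int) = some ws[k] := by
        simp [PySem.List.pyGet?_natCast, List.getElem?_eq_getElem hk]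
      rw [hget]
      show (pvGoB ws counts (PySem.List.enumerate rest ((s : Int) + 1))).map
          (fun tl => (((s : Nat) : Int), String.ofList [ws[k]]) :: tl) = _
      rw [hrec (k + 1) (by omega) (by rw [if_pos hx]; push_cast; ring)]
      simp [pvSpecL, hx, List.getD, List.getElem?_eq_getElem hk]
    · have hcnt : (c :: rest).count 'x' = rest.count 'x' := by simp [hx]
      rw [if_neg hx]
      show (pvGoB ws counts (PySem.List.enumerate rest ((s : Int) + 1))).map
          (fun tl => (((s : Nat) : Int), String.ofList [c]) :: tl) = _
      rw [hrec k (by omega) (by simp [hx])]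
      simp [pvSpecL, hx]

-- ===== VERDICT (by name: the statement is the Claim_ definition above) =====
theorem make_lookup_alignment_dict_spec : Claim_equal_make_lookup_alignment_dict := by
  intro wt_seq rf_line _ hpre
  unfold Spec_make_lookup_alignment_dict
  unfold Pre_make_lookup_alignment_dict at hpre
  unfold make_lookup_alignment_dict make_lookup_alignment_dict_alt
  have hA := pvGoA_eq wt_seq.toList rf_line.toList 0 0 PySem.Dict.empty
    (by simpa using hpre) (by simp [PySem.Dict.empty])
  have hB := pvGoB_eq wt_seq.toList (pvCounts rf_line.toList 0) rf_line.toList 0 0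
    (by simpa using hpre)
    (by
      intro j hj
      have := pvCounts_getD rf_line.toList 0 j hj
      simp [PySem.List.pyGetD_natCast, List.getD] at this ⊢
      simpa using this)
  norm_num at hB
  rw [hA, hB]
  simp [PySem.Dict.empty]
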